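-- pv_equiv track=rewrite | github.com/mbenhaddou/kdmt | kdmt/sequences.py | _get_all_dimensions
-- ===== SOURCE A (Python) =====
-- from typing import Sized, Generator, Collection, Sequence, Union, Optional
--
-- def _get_all_dimensions(batch, level: int = 0, res = None):
--     """Return all presented element sizes of each dimension.
--
--     Args:
--         batch: Data array.
--         level: Recursion level.
--         res: List containing element sizes of each dimension.
--
--     Return:
--         List, i-th element of which is list containing all presented sized of batch's i-th dimension.
--
--     Examples:
--         >>> x = [[[1], [2, 3]], [[4], [5, 6, 7], [8, 9]]]
--         >>> _get_all_dimensions(x)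
--         [[2], [2, 3], [1, 2, 1, 3, 2]]
--
--     """
--     if not level:
--         res = [[len(batch)]]
--     if len(batch) and isinstance(batch[0], Sized) and not isinstance(batch[0], str):
--         level += 1
--         if len(res) <= level:
--             res.append([])
--         for item in batch:
--             res[level].append(len(item))
--             _get_all_dimensions(item, level, res)
--     return res
-- ===== SOURCE B (Python) =====
-- from typing import Sized
--
-- def _get_all_dimensions(batch, level: int = 0, res=None):
--     # Iterative breadth-first (level-order) rewrite of the recursive DFS.
--     # Same signature; mutates a passed-in `res` in place like the original.
--     if not level:
--         res = [[len(batch)]]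
--     current = [batch]
--     while current:
--         level += 1
--         next_nodes = []
--         for node in current:
--             if len(node) and isinstance(node[0], Sized) and not isinstance(node[0], str):
--                 if len(res) <= level:
--                     res.append([])
--                 for child in node:
--                     res[level].append(len(child))
--                     next_nodes.append(child)
--         current = next_nodes
--     return res
-- ===== Notes on version B (the rewrite author's own statement) =====
-- stated objective: alternative
-- what changed: The recursive depth-first traversal is replaced by an iterative breadth-first (level-order) loop that keeps a frontier of nodes and fills one dimension list per layer, with no recursion at all.
-- outside the precondition, e.g. on _get_all_dimensions([[[1]]], -1, [[9]]): A returns [[9, 1]], B returns [[9, 1], [1]]; on _get_all_dimensions([], 5, None): A returns None, B returns None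
import Mathlib
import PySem

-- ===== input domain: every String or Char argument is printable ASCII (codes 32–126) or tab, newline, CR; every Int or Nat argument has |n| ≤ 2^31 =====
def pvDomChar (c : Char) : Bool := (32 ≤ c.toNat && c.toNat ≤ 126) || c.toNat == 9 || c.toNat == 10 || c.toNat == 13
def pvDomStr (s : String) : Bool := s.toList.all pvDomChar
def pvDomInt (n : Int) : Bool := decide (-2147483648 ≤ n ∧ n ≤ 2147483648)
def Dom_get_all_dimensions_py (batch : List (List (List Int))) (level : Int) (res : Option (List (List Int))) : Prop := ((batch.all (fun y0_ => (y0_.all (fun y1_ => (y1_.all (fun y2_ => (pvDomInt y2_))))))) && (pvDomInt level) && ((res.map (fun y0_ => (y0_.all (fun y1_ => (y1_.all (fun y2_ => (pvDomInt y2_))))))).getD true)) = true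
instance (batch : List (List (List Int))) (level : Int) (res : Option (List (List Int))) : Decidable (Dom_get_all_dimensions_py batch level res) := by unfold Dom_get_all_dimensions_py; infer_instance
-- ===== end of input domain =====

-- B replaces A's depth-first recursion by an iterative breadth-first layer loop (objective: alternative,
-- same cost). Both A and B mutate a caller-supplied `res` the same way inside Pre_; the equivalence proved
-- here is about the RETURN value.

-- ===== PORT A =====

-- res[i].append(v): exact for an in-range Python index i (possibly negative); an out-of-range i is an
-- IndexError in Python and is excluded by Pre_, here the list is returned unchanged.
def pyAppendAt (res : List (List Int)) (i : Int) (v : Int) : List (List Int) :=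
  let j : Int := if i < 0 then i + res.length else i
  if 0 ≤ j ∧ j < res.length then res.modify j.toNat (· ++ [v]) else res

-- recursive call at the innermost nesting level: `sub` is a list of ints, so either it is empty or
-- sub[0] is an int (not Sized) — no mutation of the shared res; a level-0 call rebinds res locally,
-- so the shared res is untouched in that case too. The call returns the shared res unchanged.
def goA1 (sub : List Int) (level : Int) (res : List (List Int)) : List (List Int) := res

-- recursive call one level up: `item` is a list of lists.
def goA2 (item : List (List Int)) (level : Int) (res : List (List Int)) : List (List Int) :=
  if level = 0 then res  -- `if not level: res = [[len(batch)]]` rebinds res: the caller's list is untouched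
  else if item.length ≠ 0 then  -- item[0] is a list: Sized and not str
    let l := level + 1
    let r := if (res.length : Int) ≤ l then res ++ [[]] else res
    item.foldl (fun r sub => goA1 sub l (pyAppendAt r l (sub.length : Int))) r
  else res

-- the body after the `if not level` initialisation, at the outermost nesting level
def goBody3 (batch : List (List (List Int))) (level : Int) (res : List (List Int)) : List (List Int) :=
  if batch.length ≠ 0 then  -- batch[0] is a list: Sized and not str
    let l := level + 1
    let r := if (res.length : Int) ≤ l then res ++ [[]] else res
    batch.foldl (fun r item => goA2 item l (pyAppendAt r l (item.length : Int))) r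
  else res

def get_all_dimensions_py (batch : List (List (List Int))) (level : Int) (res : Option (List (List Int))) : List (List Int) :=
  if level = 0 then goBody3 batch 0 [[(batch.length : Int)]]
  else match res with
    | none => []  -- Python raises TypeError on len(None) (or returns the non-list None); excluded by Pre_
    | some r => goBody3 batch level r

-- ===== PORT B =====

-- one layer of the breadth-first loop: fold over the frontier; a node whose first element is Sized
-- (encoded by `childSized`, fixed per layer by the element type) lazily creates the dimension list and
-- appends its children's lengths and the children to the next frontier.
def pvLayer {α : Type} (childSized : Bool) (len_ : α → Int) (current : List (List α)) (level : Int)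
    (res : List (List Int)) : List α × List (List Int) :=
  current.foldl (fun acc node =>
    if node.length ≠ 0 ∧ childSized = true then
      let r1 := if (acc.2.length : Int) ≤ level then acc.2 ++ [[]] else acc.2
      node.foldl (fun acc2 child => (acc2.1 ++ [child], pyAppendAt acc2.2 level (len_ child))) (acc.1, r1)
    else acc) (([] : List α), res)

-- the while loop of Source B, unrolled once per (statically known) nesting depth; the frontier after the
-- third layer is empty (ints are not Sized), so the loop exits there.
def get_all_dimensions_py_alt (batch : List (List (List Int))) (level : Int) (res : Option (List (List Int))) : List (List Int) :=
  match (if level = 0 then some [[(batch.length : Int)]] else res) with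
  | none => []  -- Python raises TypeError on len(None); excluded by Pre_
  | some r0 =>
    let s1 := pvLayer true (fun (x : List (List Int)) => (x.length : Int)) [batch] (level + 1) r0
    if s1.1.isEmpty then s1.2
    else
      let s2 := pvLayer true (fun (x : List Int) => (x.length : Int)) s1.1 (level + 2) s1.2
      if s2.1.isEmpty then s2.2
      else (pvLayer false (fun (_ : Int) => (0 : Int)) s2.1 (level + 3) s2.2).2

-- ===== PRECONDITION & SPEC =====
-- Pre_ excludes (a) calls where A raises (res=None with nonzero level and nonempty batch, or a res too
-- short for the indices used: TypeError/IndexError), (b) res=None with nonzero level and empty batch,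
-- where A returns None, which is not a value of the declared list type, and (c) negative levels with a
-- nonempty batch — outside the documented non-negative "recursion level" domain, where A's value hangs
-- on negative-index wraparound and on a level-0 rebind of res that silently drops deeper dimensions.
def Pre_get_all_dimensions_py (batch : List (List (List Int))) (level : Int) (res : Option (List (List Int))) : Prop :=
  level = 0 ∨ (res.isSome = true ∧ (batch = [] ∨ (1 ≤ level ∧ level + 1 ≤ ((res.getD []).length : Int))))
instance (batch : List (List (List Int))) (level : Int) (res : Option (List (List Int))) : Decidable (Pre_get_all_dimensions_py batch level res) := by unfold Pre_get_all_dimensions_py; infer_instance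

def pvWitness_get_all_dimensions_py : List (List (List Int)) × Int × Option (List (List Int)) :=
  ([[[1], [2, 3]], [[4], [5, 6, 7], [8, 9]]], 0, none)

def Spec_get_all_dimensions_py (batch : List (List (List Int))) (level : Int) (res : Option (List (List Int))) (out : List (List Int)) : Prop := out = get_all_dimensions_py_alt batch level res
instance (batch : List (List (List Int))) (level : Int) (res : Option (List (List Int))) (out : List (List Int)) : Decidable (Spec_get_all_dimensions_py batch level res out) := by unfold Spec_get_all_dimensions_py; infer_instance

-- ===== CLAIM (what is proved, stated in full; the proofs are below) =====
def Claim_equal_get_all_dimensions_py : Prop := ∀ (batch : List (List (List Int))) (level : Int) (res : Option (List (List Int))), Dom_get_all_dimensions_py batch level res → Pre_get_all_dimensions_py batch level res → Spec_get_all_dimensions_py batch level res (get_all_dimensions_py batch level res)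

-- ===== LEMMAS AND PROOFS =====

def lensOf {α : Type} (xs : List (List α)) : List Int := xs.map (fun x => (x.length : Int))

def lens2Of (items : List (List (List Int))) : List Int :=
  items.flatMap (fun it => if it.isEmpty then [] else lensOf it)

def padTo (m : Int) (r : List (List Int)) : List (List Int) :=
  if (r.length : Int) ≤ m then r ++ [[]] else r

lemma pyAppendAt_spec (r : List (List Int)) (i : Int) (v : Int) (h0 : 0 ≤ i) (h1 : i < (r.length : Int)) :
    pyAppendAt r i v = r.modify i.toNat (· ++ [v]) := by
  simp [pyAppendAt, h1, h0, not_lt.mpr h0]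

lemma modify_append_nil (r : List (List Int)) (j : Nat) : r.modify j (· ++ []) = r := by
  apply List.ext_getElem?; intro k
  simp [List.getElem?_modify]

lemma modify_modify_same (r : List (List Int)) (j : Nat) (a b : List Int) :
    (r.modify j (· ++ a)).modify j (· ++ b) = r.modify j (· ++ (a ++ b)) := by
  apply List.ext_getElem?; intro k
  simp [List.getElem?_modify]
  rcases r[k]? with _ | x <;> simp <;> split <;> simp

lemma modify_modify_comm (r : List (List Int)) (i j : Nat) (f g : List Int → List Int) (h : i ≠ j) :
    (r.modify i f).modify j g = (r.modify j g).modify i f := by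
  apply List.ext_getElem?; intro k
  simp [List.getElem?_modify]
  rcases r[k]? with _ | x <;> simp <;> split <;> split <;> simp_all

lemma modify_append_left (r t : List (List Int)) (j : Nat) (f : List Int → List Int) (h : j < r.length) :
    (r ++ t).modify j f = r.modify j f ++ t := by
  apply List.ext_getElem?; intro k
  by_cases hk : k < r.length
  · simp [List.getElem?_modify, List.getElem?_append_left, hk, List.length_modify, List.getElem_modify]
  · simp [List.getElem?_modify, List.getElem?_append_right, (by omega : r.length ≤ k), List.length_modify]
    rcases t[k - r.length]? with _ | x
    · simp
    · simp; omega

lemma padTo_modify (r : List (List Int)) (m : Int) (j : Nat) (f : List Int → List Int) (h : j < r.length) :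
    padTo m (r.modify j f) = (padTo m r).modify j f := by
  unfold padTo
  simp only [List.length_modify]
  split
  · exact (modify_append_left r [[]] j f h).symm
  · rfl

lemma length_padTo (r : List (List Int)) (m : Int) (h : m ≤ (r.length : Int)) :
    m < ((padTo m r).length : Int) := by
  unfold padTo; split
  · simp; omega
  · omega

lemma padTo_eq_self (r : List (List Int)) (m : Int) (h : m < (r.length : Int)) :
    padTo m r = r := by
  unfold padTo; split
  · exfalso; omega
  · rfl

lemma lens2Of_nil_of_all_empty (items : List (List (List Int)))
    (h : items.any (fun it => !it.isEmpty) = false) : lens2Of items = [] := by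
  induction items with
  | nil => rfl
  | cons it rest ih =>
    simp at h
    simp [lens2Of, List.flatMap_cons, h.1]
    have := ih (by simp; exact h.2)
    simpa [lens2Of] using this

lemma innerFoldA (subs : List (List Int)) (l : Int) (h0 : 1 ≤ l) :
    ∀ r : List (List Int), l < (r.length : Int) →
    subs.foldl (fun r sub => goA1 sub l (pyAppendAt r l (sub.length : Int))) r
      = r.modify l.toNat (· ++ lensOf subs) := by
  induction subs with
  | nil => intro r hr; simp only [List.foldl_nil, lensOf, List.map_nil, modify_append_nil]
  | cons s ss ih =>
    intro r hr
    simp only [List.foldl_cons, goA1] at ih ⊢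
    rw [pyAppendAt_spec r l _ (by omega) hr]
    rw [ih _ (by simpa using hr)]
    rw [modify_modify_same]
    simp [lensOf]

lemma goA2_of_ne (it : List (List Int)) (l : Int) (r : List (List Int))
    (h0 : 1 ≤ l) (hr : l < (r.length : Int)) (hit : it ≠ []) :
    goA2 it l r = (padTo (l+1) r).modify (l+1).toNat (· ++ lensOf it) := by
  unfold goA2
  rw [if_neg (by omega), if_pos (by simpa using hit)]
  show it.foldl _ (if (r.length : Int) ≤ l + 1 then r ++ [[]] else r) = _
  rw [show (if (r.length : Int) ≤ l + 1 then r ++ [[]] else r) = padTo (l+1) r from rfl]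
  exact innerFoldA it (l+1) (by omega) _ (length_padTo r (l+1) (by omega))

lemma foldA (items : List (List (List Int))) (l : Int) (h0 : 1 ≤ l) :
    ∀ r : List (List Int), l < (r.length : Int) →
    items.foldl (fun r item => goA2 item l (pyAppendAt r l (item.length : Int))) r
      = (if items.any (fun it => !it.isEmpty)
         then (padTo (l+1) (r.modify l.toNat (· ++ lensOf items))).modify (l+1).toNat (· ++ lens2Of items)
         else r.modify l.toNat (· ++ lensOf items)) := by
  induction items with
  | nil => intro r hr; simp only [List.foldl_nil, List.any_nil, if_neg Bool.false_ne_true, lensOf,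
      List.map_nil, modify_append_nil]
  | cons it rest ih =>
    intro r hr
    simp only [List.foldl_cons]
    rw [pyAppendAt_spec r l _ (by omega) hr]
    have hlenA : (r.modify l.toNat (· ++ [(it.length : Int)])).length = r.length := by
      simp
    have hmerge : ∀ xs : List Int,
        (r.modify l.toNat (· ++ [(it.length : Int)])).modify l.toNat (· ++ xs)
          = r.modify l.toNat (· ++ ((it.length : Int) :: xs)) := by
      intro xs; rw [modify_modify_same]; simp
    by_cases hit : it = []
    · have hg : goA2 it l (r.modify l.toNat (· ++ [(it.length : Int)]))
          = r.modify l.toNat (· ++ [(it.length : Int)]) := by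
        subst hit; unfold goA2; rw [if_neg (by omega)]; simp
      rw [hg, ih _ (by rw [hlenA] at *; exact hr)]
      rw [hmerge]
      subst hit
      simp [lensOf, lens2Of]
    · have hg := goA2_of_ne it l (r.modify l.toNat (· ++ [(it.length : Int)])) h0
        (by rw [hlenA]; exact_mod_cast hr) hit
      rw [hg]
      set rA := r.modify l.toNat (· ++ [(it.length : Int)]) with hrA
      have hlenB : l < (((padTo (l+1) rA).modify (l+1).toNat (· ++ lensOf it)).length : Int) := by
        have := length_padTo rA (l+1) (by rw [hlenA]; omega)
        simp only [List.length_modify]; omega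
      rw [ih _ hlenB]
      have hne : (l+1).toNat ≠ l.toNat := by omega
      have hcomm : ∀ xs ys : List Int,
          ((padTo (l+1) rA).modify (l+1).toNat (· ++ xs)).modify l.toNat (· ++ ys)
            = (padTo (l+1) (r.modify l.toNat (· ++ ((it.length : Int) :: ys)))).modify (l+1).toNat (· ++ xs) := by
        intro xs ys
        rw [modify_modify_comm _ _ _ _ _ hne]
        rw [← padTo_modify rA (l+1) l.toNat _ (by rw [hlenA]; omega)]
        rw [hrA, modify_modify_same]
        simp
      have hany : (it :: rest).any (fun it => !it.isEmpty) = true := by simp [hit]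
      rw [hany, if_pos rfl]
      split
      · rw [hcomm]
        rw [padTo_eq_self _ _ (by
          simp only [List.length_modify]
          have := length_padTo (r.modify l.toNat (· ++ ((it.length : Int) :: lensOf rest))) (l+1) (by simp; omega)
          omega)]
        rw [modify_modify_same]
        simp [lensOf, lens2Of, hit]
      · rename_i hfalse
        have h2 : lens2Of (it :: rest) = lensOf it := by
          have hre : lens2Of rest = [] := lens2Of_nil_of_all_empty rest (Bool.eq_false_iff.mpr hfalse)
          unfold lens2Of at hre ⊢
          rw [List.flatMap_cons, if_neg (by simpa using hit), hre, List.append_nil]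
        rw [hcomm, h2]
        simp [lensOf]

lemma modify_id (r : List (List Int)) (j : Nat) : r.modify j (fun x => x) = r := by
  apply List.ext_getElem?; intro k; simp [List.getElem?_modify]

lemma pairFold {α : Type} (len_ : α → Int) (node : List α) (l : Int) (h0 : 0 ≤ l) :
    ∀ (ns : List α) (r : List (List Int)), l < (r.length : Int) →
    node.foldl (fun acc2 child => (acc2.1 ++ [child], pyAppendAt acc2.2 l (len_ child))) (ns, r)
      = (ns ++ node, r.modify l.toNat (· ++ node.map (fun x => len_ x))) := by
  induction node with
  | nil => intro ns r hr; simp [modify_id]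
  | cons c cs ih =>
    intro ns r hr
    simp only [List.foldl_cons]
    rw [pyAppendAt_spec r l _ h0 hr]
    rw [ih (ns ++ [c]) _ (by simpa using hr)]
    rw [modify_modify_same]
    simp

lemma layer3_id (cur : List (List Int)) (l : Int) (r : List (List Int)) :
    pvLayer false (fun (_ : Int) => (0 : Int)) cur l r = ([], r) := by
  unfold pvLayer
  induction cur with
  | nil => rfl
  | cons c cs ih => simpa using ih

lemma foldB2 (items : List (List (List Int))) (l : Int) (h0 : 1 ≤ l) :
    ∀ (ns : List (List Int)) (r : List (List Int)), l < (r.length : Int) →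
    items.foldl (fun acc node =>
      if node.length ≠ 0 then
        node.foldl (fun acc2 child => (acc2.1 ++ [child], pyAppendAt acc2.2 (l+1) ((child.length : Int))))
          (acc.1, if ((acc.2.length : Int)) ≤ (l+1) then acc.2 ++ [[]] else acc.2)
      else acc) (ns, r)
      = (ns ++ items.flatMap (fun it => if it.isEmpty then [] else it),
         if items.any (fun it => !it.isEmpty)
         then (padTo (l+1) r).modify (l+1).toNat (· ++ lens2Of items)
         else r) := by
  induction items with
  | nil => intro ns r hr; simp
  | cons it rest ih =>
    intro ns r hr
    simp only [List.foldl_cons]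
    by_cases hit : it = []
    · rw [if_neg (show ¬(it.length ≠ 0) from by simp [hit])]
      rw [ih ns r hr]
      simp [hit, lens2Of, List.flatMap_cons]
    · rw [if_pos (show it.length ≠ 0 from by simpa using hit)]
      rw [show (if ((r.length : Int)) ≤ (l+1) then r ++ [[]] else r) = padTo (l+1) r from rfl]
      have hpad := length_padTo r (l+1) (by omega)
      rw [pairFold _ it (l+1) (by omega) ns _ hpad]
      have hlen' : l < (((padTo (l+1) r).modify (l+1).toNat (· ++ it.map (fun x => (x.length : Int)))).length : Int) := by
        simp only [List.length_modify]; omega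
      rw [ih _ _ hlen']
      have hpad2 : padTo (l+1) ((padTo (l+1) r).modify (l+1).toNat (· ++ it.map (fun x => (x.length : Int))))
          = (padTo (l+1) r).modify (l+1).toNat (· ++ it.map (fun x => (x.length : Int))) := by
        apply padTo_eq_self
        simp only [List.length_modify]; omega
      have hany : (it :: rest).any (fun it => !it.isEmpty) = true := by simp [hit]
      rw [hany, if_pos rfl]
      have h2 : lens2Of (it :: rest) = lensOf it ++ lens2Of rest := by
        unfold lens2Of
        rw [List.flatMap_cons, if_neg (by simpa using hit)]
      rw [h2, hpad2]
      simp only [Prod.mk.injEq]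
      refine ⟨by simp [List.flatMap_cons, hit], ?_⟩
      split
      · rw [modify_modify_same]; simp [lensOf]
      · rename_i hfalse
        rw [lens2Of_nil_of_all_empty rest (Bool.eq_false_iff.mpr hfalse)]
        simp [lensOf]

lemma core_eq (batch : List (List (List Int))) (level : Int) (r : List (List Int))
    (h1 : batch = [] ∨ (0 ≤ level ∧ level + 1 ≤ (r.length : Int))) :
    goBody3 batch level r
      = (let s1 := pvLayer true (fun (x : List (List Int)) => (x.length : Int)) [batch] (level + 1) r
         if s1.1.isEmpty then s1.2
         else
           let s2 := pvLayer true (fun (x : List Int) => (x.length : Int)) s1.1 (level + 2) s1.2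
           if s2.1.isEmpty then s2.2
           else (pvLayer false (fun (_ : Int) => (0 : Int)) s2.1 (level + 3) s2.2).2) := by
  by_cases hb : batch = []
  · subst hb
    simp [goBody3, pvLayer]
  · have h0 : 0 ≤ level := (h1.resolve_left hb).1
    have hlen : level + 1 ≤ (r.length : Int) := (h1.resolve_left hb).2
    have hbne : batch.length ≠ 0 := by simpa using hb
    -- LHS
    unfold goBody3
    rw [if_pos hbne]
    dsimp only
    rw [show (if (r.length : Int) ≤ level + 1 then r ++ [[]] else r) = padTo (level+1) r from rfl]
    rw [foldA batch (level+1) (by omega) _ (length_padTo r (level+1) hlen)]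
    -- RHS: the third layer never changes res
    simp only [layer3_id]
    -- unfold the first two layers
    simp only [pvLayer, List.foldl_cons, List.foldl_nil, and_true]
    rw [if_pos hbne]
    rw [show (if (r.length : Int) ≤ level + 1 then r ++ [[]] else r) = padTo (level+1) r from rfl]
    rw [pairFold _ batch (level+1) (by omega) [] _ (length_padTo r (level+1) hlen)]
    simp only [List.nil_append]
    rw [if_neg (show ¬(batch.isEmpty = true) from by simpa using hb)]
    have hstep : level + 2 = (level + 1) + 1 := by ring
    rw [hstep]
    rw [foldB2 batch (level+1) (by omega) [] _ (by simp only [List.length_modify]; have := length_padTo r (level+1) hlen; omega)]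
    simp only [List.nil_append, ite_self]
    simp [lensOf]

-- ===== VERDICT (by name: the statement is the Claim_ definition above) =====
theorem get_all_dimensions_py_spec : Claim_equal_get_all_dimensions_py := by
  intro batch level res _ hpre
  unfold Spec_get_all_dimensions_py get_all_dimensions_py get_all_dimensions_py_alt
  by_cases h0 : level = 0
  · subst h0
    rw [if_pos rfl, if_pos rfl]
    exact core_eq batch 0 [[(batch.length : Int)]] (Or.inr ⟨le_refl 0, by simp⟩)
  · rw [if_neg h0, if_neg h0]
    have hsome : res.isSome = true ∧ (batch = [] ∨ (1 ≤ level ∧ level + 1 ≤ ((res.getD []).length : Int))) := by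
      rcases hpre with h | h
      · exact absurd h h0
      · exact h
    obtain ⟨r, rfl⟩ : ∃ r, res = some r := by
      rcases res with _ | r
      · simp at hsome
      · exact ⟨r, rfl⟩
    show goBody3 batch level r = _
    apply core_eq
    rcases hsome.2 with hb | ⟨h1, h2⟩
    · exact Or.inl hb
    · exact Or.inr ⟨by omega, by simpa using h2⟩
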